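-- pv_equiv track=rewrite | github.com/Tokyo113/leetcode_python | 暴力递归到动态规划/code_09_MinCoins.py | biaojiegou
-- ===== SOURCE A (Python) =====
-- def biaojiegou(arr, rest):
--     dp = [[-2 for i in range(rest+1)] for i in range(len(arr)+1)]
--
--     for i in range(len(arr)+1):
--         dp[i][0] = 0
--     for res in range(1,rest+1):
--         dp[len(arr)][res] = -1
--
--     for i in range(len(arr)-1, -1, -1):
--         for res in range(1,rest+1):
--             p1 = dp[i+1][res]
--             p2 = -1 if res < arr[i] else dp[i+1][res-arr[i]]
--             if p1 == -1 and p2 == -1: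
--                 dp[i][res] = -1
--             elif p1 == -1:
--                 dp[i][res] = p2+1
--             elif p2 == -1:
--                 dp[i][res] = p1
--             else:
--                 dp[i][res] = min(p1, p2+1)
--     return dp[0][rest]
-- ===== SOURCE B (Python) =====
-- def biaojiegou(arr, rest):
--     # Layered subset-sum reachability with bitmasks: bits[k] has bit s set iff
--     # some k of the coins (each used at most once) sum to exactly s (s <= rest).
--     # The answer is the first layer whose mask contains rest.
--     full = (1 << (rest + 1)) - 1
--     bits = [1]
--     for c in arr:
--         if c <= rest:
--             bits.append(0)
--             for k in range(len(bits) - 2, -1, -1):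
--                 bits[k + 1] |= (bits[k] << c) & full
--     for k, b in enumerate(bits):
--         if (b >> rest) & 1:
--             return k
--     return -1
-- ===== Notes on version B (the rewrite author's own statement) =====
-- stated objective: alternative
-- what changed: Replaces A's dense backward 2D min-count table (with -1/-2 sentinels) by layered subset-sum reachability: big-integer bitmasks bits[k] whose bit s says that exactly k coins (each used once) sum to s, updated per coin by a descending OR of shifted layers, answering with the first layer containing bit rest.
-- outside the precondition, e.g. on biaojiegou([-1], 0): A returns 0, B raises ValueError
import Mathlib
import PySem

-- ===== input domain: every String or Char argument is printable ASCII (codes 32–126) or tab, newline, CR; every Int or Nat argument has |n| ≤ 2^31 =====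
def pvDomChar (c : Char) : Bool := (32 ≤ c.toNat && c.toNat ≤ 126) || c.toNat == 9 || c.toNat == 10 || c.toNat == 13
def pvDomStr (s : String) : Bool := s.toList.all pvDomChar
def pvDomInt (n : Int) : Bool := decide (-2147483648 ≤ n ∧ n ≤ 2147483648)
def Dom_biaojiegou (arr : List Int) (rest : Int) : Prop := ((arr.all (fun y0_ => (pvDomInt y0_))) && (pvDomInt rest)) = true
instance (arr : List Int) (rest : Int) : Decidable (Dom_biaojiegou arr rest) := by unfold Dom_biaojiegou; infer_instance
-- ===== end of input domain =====

-- B replaces A's dense backward 2D min-count table by layered subset-sum reachability bitmasks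
-- (bits[k] = mask of sums makable with exactly k coins), answering with the first layer holding rest.

-- ===== PORT A =====
-- Literal transliteration of A's 2D dynamic-programming table with list mutation.
-- All indices written .toNat are produced nonnegative under Pre_, where this indexing is exact.
def biaojiegou (arr : List Int) (rest : Int) : Int :=
  let n := arr.length
  -- dp = [[-2 for i in range(rest+1)] for i in range(len(arr)+1)]
  let dp : List (List Int) :=
    (PySem.List.pyRange 0 ((n : Int) + 1) 1).map (fun _ =>
      (PySem.List.pyRange 0 (rest + 1) 1).map (fun _ => (-2 : Int)))
  -- for i in range(len(arr)+1): dp[i][0] = 0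
  let dp := (PySem.List.pyRange 0 ((n : Int) + 1) 1).foldl
      (fun dp i => dp.set i.toNat ((dp.getD i.toNat []).set 0 0)) dp
  -- for res in range(1, rest+1): dp[len(arr)][res] = -1
  let dp := (PySem.List.pyRange 1 (rest + 1) 1).foldl
      (fun dp res => dp.set n ((dp.getD n []).set res.toNat (-1))) dp
  -- for i in range(len(arr)-1, -1, -1): for res in range(1, rest+1): ...
  let dp := (PySem.List.pyRange ((n : Int) - 1) (-1) (-1)).foldl
      (fun dp i =>
        (PySem.List.pyRange 1 (rest + 1) 1).foldl
          (fun dp res =>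
            let p1 := (dp.getD (i.toNat + 1) []).getD res.toNat (-2)
            let p2 := if res < arr.getD i.toNat 0 then (-1 : Int)
                      else (dp.getD (i.toNat + 1) []).getD (res - arr.getD i.toNat 0).toNat (-2)
            let v : Int :=
              if p1 = -1 ∧ p2 = -1 then -1
              else if p1 = -1 then p2 + 1
              else if p2 = -1 then p1
              else min p1 (p2 + 1)
            dp.set i.toNat ((dp.getD i.toNat []).set res.toNat v)) dp) dp
  (dp.getD 0 []).getD rest.toNat (-2)

-- ===== PORT B =====
-- Python '<<', '>>', '|', '&' ported by hand via Nat bitwise operations on .toNat: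
-- exact whenever both operands are nonnegative, which holds throughout B's run under Pre_.
def pvShl (x c : Int) : Int := ((x.toNat <<< c.toNat : Nat) : Int)
def pvShr (x c : Int) : Int := ((x.toNat >>> c.toNat : Nat) : Int)
def pvLor (x y : Int) : Int := ((x.toNat ||| y.toNat : Nat) : Int)
def pvLand (x y : Int) : Int := ((x.toNat &&& y.toNat : Nat) : Int)

-- 'for k, b in enumerate(bits): if (b >> rest) & 1: return k' / 'return -1'
def pvScan : List Int → Int → Int → Int
  | [], _, _ => -1
  | b :: bs, rest, k => if pvLand (pvShr b rest) 1 ≠ 0 then k else pvScan bs rest (k + 1)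

-- Literal transliteration of Source B: bits[k] is the bitmask of the sums (≤ rest) makable with
-- exactly k coins; per usable coin a new layer is appended and the layers are updated downwards.
def biaojiegou_alt (arr : List Int) (rest : Int) : Int :=
  -- full = (1 << (rest + 1)) - 1
  let full : Int := pvShl 1 (rest + 1) - 1
  -- bits = [1]
  let bits : List Int := [1]
  -- for c in arr: if c <= rest: bits.append(0); for k in range(len(bits)-2, -1, -1): ...
  let bits := arr.foldl (fun bits c =>
      if c ≤ rest then
        let bits2 := bits ++ [0]
        (PySem.List.pyRange ((bits2.length : Int) - 2) (-1) (-1)).foldl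
          (fun bs k =>
            bs.set (k.toNat + 1)
              (pvLor (bs.getD (k.toNat + 1) 0) (pvLand (pvShl (bs.getD k.toNat 0) c) full)))
          bits2
      else bits) bits
  pvScan bits rest 0

-- ===== PRECONDITION & SPEC =====
-- Pre_ excludes negative rest and negative coins. There A raises IndexError (out-of-range 2D
-- access) and B raises ValueError (negative shift) — except in the accidental corner rest = 0
-- with a negative coin, where A's loops are empty and it returns 0 while B's shift still raises;
-- that corner is excluded because B raises there, and it is cited in claim.json.
def Pre_biaojiegou (arr : List Int) (rest : Int) : Prop :=
  0 ≤ rest ∧ ∀ c ∈ arr, 0 ≤ c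
instance (arr : List Int) (rest : Int) : Decidable (Pre_biaojiegou arr rest) := by
  unfold Pre_biaojiegou; infer_instance

def pvWitness_biaojiegou : List Int × Int := ([1, 2, 5], 11)

def Spec_biaojiegou (arr : List Int) (rest : Int) (out : Int) : Prop := out = biaojiegou_alt arr rest
instance (arr : List Int) (rest : Int) (out : Int) : Decidable (Spec_biaojiegou arr rest out) := by
  unfold Spec_biaojiegou; infer_instance

-- ===== CLAIM (what is proved, stated in full; the proofs are below) =====
def Claim_equal_biaojiegou : Prop := ∀ (arr : List Int) (rest : Int), Dom_biaojiegou arr rest → Pre_biaojiegou arr rest → Spec_biaojiegou arr rest (biaojiegou arr rest)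

-- ===== LEMMAS AND PROOFS =====


-- The common mathematical model: rows as functions Int → Option Int (none = unmakable),
-- pvM = min-merge, pvS = "+1", pvT c = the per-coin transform shared by both programs.
def pvM (x y : Option Int) : Option Int :=
  match x, y with
  | none, y => y
  | some a, none => some a
  | some a, some b => some (min a b)

def pvS (x : Option Int) : Option Int := x.map (· + 1)

def pvT (c : Int) (r : Int → Option Int) : Int → Option Int :=
  fun res => pvM (r res) (pvS (r (res - c)))

def pvBase : Int → Option Int := fun res => if res = 0 then some 0 else none

theorem pvT_comm (a b : Int) (r : Int → Option Int) : pvT a (pvT b r) = pvT b (pvT a r) := by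
  funext res
  have h : res - a - b = res - b - a := by ring
  simp only [pvT, h]
  rcases hx : r res with _ | x <;> rcases hy : r (res - a) with _ | y <;>
    rcases hz : r (res - b) with _ | z <;> rcases hw : r (res - b - a) with _ | w <;>
    simp [pvM, pvS] <;> omega

theorem foldr_pvT_comm (l : List Int) (c : Int) (r : Int → Option Int) :
    l.foldr pvT (pvT c r) = pvT c (l.foldr pvT r) := by
  induction l with
  | nil => rfl
  | cons d l ih => simp [List.foldr_cons, ih, pvT_comm]

theorem foldl_pvT_eq_foldr (l : List Int) (r : Int → Option Int) :
    l.foldl (fun r c => pvT c r) r = l.foldr pvT r := by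
  induction l generalizing r with
  | nil => rfl
  | cons c l ih => simp [List.foldl_cons, List.foldr_cons, ih, foldr_pvT_comm]

-- invariants preserved by pvT (c ≥ 0)
theorem pvT_neg {c : Int} (hc : 0 ≤ c) {r : Int → Option Int}
    (h : ∀ res < 0, r res = none) : ∀ res < 0, pvT c r res = none := by
  intro res hres
  have h1 := h res hres
  have h2 := h (res - c) (by omega)
  simp [pvT, h1, h2, pvM, pvS]

theorem pvT_zero {c : Int} (hc : 0 ≤ c) {r : Int → Option Int}
    (hneg : ∀ res < 0, r res = none) (h0 : r 0 = some 0) : pvT c r 0 = some 0 := by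
  rcases eq_or_lt_of_le hc with h | h
  · simp [pvT, ← h, h0, pvM, pvS]
  · have hn : r (-c) = none := hneg (-c) (by omega)
    simp [pvT, h0, hn, pvM, pvS]

theorem pvT_nonneg {c : Int} {r : Int → Option Int}
    (h : ∀ res v, r res = some v → 0 ≤ v) :
    ∀ res v, pvT c r res = some v → 0 ≤ v := by
  intro res v hv
  rcases hx : r res with _ | x <;> rcases hy : r (res - c) with _ | y <;>
    simp [pvT, hx, hy, pvM, pvS] at hv <;>
    first
    | exact absurd hv (by simp)
    | (have := h res x hx; omega)
    | (have := h (res - c) y hy; omega)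
    | (have := h res x hx; have := h (res - c) y hy; omega)

theorem foldr_pvT_neg {l : List Int} (hc : ∀ c ∈ l, 0 ≤ c) :
    ∀ res < 0, l.foldr pvT pvBase res = none := by
  induction l with
  | nil => intro res h; simp [pvBase]; omega
  | cons c l ih =>
    exact pvT_neg (hc c (by simp)) (ih (fun d hd => hc d (by simp [hd])))

theorem foldr_pvT_zero {l : List Int} (hc : ∀ c ∈ l, 0 ≤ c) :
    l.foldr pvT pvBase 0 = some 0 := by
  induction l with
  | nil => simp [pvBase]
  | cons c l ih =>
    exact pvT_zero (hc c (by simp)) (foldr_pvT_neg (fun d hd => hc d (by simp [hd])))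
      (ih (fun d hd => hc d (by simp [hd])))

theorem foldr_pvT_nonneg {l : List Int} :
    ∀ res v, l.foldr pvT pvBase res = some v → 0 ≤ v := by
  induction l with
  | nil =>
    intro res v hv
    by_cases h : res = 0 <;> simp [pvBase, h] at hv <;> omega
  | cons c l ih => exact pvT_nonneg ih

-- generic list plumbing -----------------------------------------------------

theorem pv_getD_set_self {α : Type} (l : List α) (i : Nat) (x d : α) (h : i < l.length) :
    (l.set i x).getD i d = x := by
  simp [List.getD, h]

theorem pv_getD_set_ne {α : Type} (l : List α) (i j : Nat) (x : α) (d : α) (h : i ≠ j) :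
    (l.set i x).getD j d = l.getD j d := by
  simp [List.getD, List.getElem?_set_ne h]

theorem pv_set_getD_self {α : Type} (l : List α) (i : Nat) (d : α) (h : i < l.length) :
    l.set i (l.getD i d) = l := by
  simp [List.getD, List.getElem?_eq_getElem h, List.set_getElem_self]

-- a fold that only writes at the fixed index i (reading rows i and i+1) factors through that row
theorem pv_foldl_set_fix {α β : Type} (l : List β) (i : Nat) (g : α → α → β → α) (d : α) :
    ∀ (dp : List α), i < dp.length →
    l.foldl (fun dp x => dp.set i (g (dp.getD (i + 1) d) (dp.getD i d) x)) dp
      = dp.set i (l.foldl (g (dp.getD (i + 1) d)) (dp.getD i d)) := by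
  induction l with
  | nil =>
    intro dp h
    simpa [List.getD] using (pv_set_getD_self dp i d h).symm
  | cons x xs ih =>
    intro dp h
    simp only [List.foldl_cons]
    rw [ih (dp.set i (g (dp.getD (i + 1) d) (dp.getD i d) x)) (by simpa using h)]
    rw [pv_getD_set_ne _ _ _ _ _ (by omega), pv_getD_set_self _ _ _ _ h, List.set_set]

-- a fold of independent per-index writes over range k on a replicate
theorem pv_foldl_set_diag {α : Type} (f : α → α) (d x : α) :
    ∀ (k m : Nat), k ≤ m →
    ((List.range k).foldl (fun dp i => dp.set i (f (dp.getD i d))) (List.replicate m x))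
      = List.replicate k (f x) ++ List.replicate (m - k) x := by
  intro k
  induction k with
  | zero => simp
  | succ k ih =>
    intro m hm
    rw [List.range_succ, List.foldl_append, ih m (by omega)]
    simp only [List.foldl_cons, List.foldl_nil]
    have hrep : List.replicate (m - k) x = x :: List.replicate (m - (k + 1)) x := by
      rw [← List.replicate_succ]; congr 1; omega
    rw [hrep]
    have hgd : (List.replicate k (f x) ++ x :: List.replicate (m - (k + 1)) x).getD k d = x := by
      simp [List.getD, List.getElem?_append_right (by simp : (List.replicate k (f x)).length ≤ k)]
    rw [hgd]
    have hset : (List.replicate k (f x) ++ x :: List.replicate (m - (k + 1)) x).set k (f x)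
        = List.replicate k (f x) ++ f x :: List.replicate (m - (k + 1)) x := by
      rw [List.set_append_right _ _ (by simp)]
      simp
    rw [hset, List.replicate_succ']
    simp

-- a fold of writes at nonnegative Int indices, value depending only on the index
theorem pv_getD_foldl_set {α : Type} (l : List Int) (v : Int → α) (d : α) :
    ∀ (row : List α) (k : Nat), (∀ j ∈ l, 0 ≤ j) → k < row.length →
    (l.foldl (fun row res => row.set res.toNat (v res)) row).getD k d
      = if (k : Int) ∈ l then v k else row.getD k d := by
  induction l with
  | nil => intro row k _ _; simp
  | cons h t ih =>
    intro row k hl hk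
    simp only [List.foldl_cons]
    rw [ih _ k (fun j hj => hl j (by simp [hj])) (by simpa using hk)]
    by_cases hmem : (k : Int) ∈ t
    · simp [hmem]
    · by_cases hkh : (k : Int) = h
      · have hh : h.toNat = k := by omega
        rw [if_neg hmem, hh, pv_getD_set_self row k (v h) d hk,
          if_pos (by simp [hkh]), ← hkh]
      · have hne : h.toNat ≠ k := by have := hl h (by simp); omega
        rw [if_neg hmem, pv_getD_set_ne _ _ _ _ _ hne, if_neg (by simp [hkh, hmem])]

-- encoding of Option counts as A's -1 sentinel
def pvEnc (o : Option Int) : Int := o.getD (-1)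

-- A-side: named row-building blocks matching the port's loops
def pvVal (c : Int) (R : List Int) (res : Int) : Int :=
  let p1 := R.getD res.toNat (-2)
  let p2 := if res < c then (-1 : Int) else R.getD (res - c).toNat (-2)
  if p1 = -1 ∧ p2 = -1 then -1
  else if p1 = -1 then p2 + 1
  else if p2 = -1 then p1
  else min p1 (p2 + 1)

def pvR1 (rest : Int) : List Int :=
  ((PySem.List.pyRange 0 (rest + 1) 1).map (fun _ => (-2 : Int))).set 0 0

def pvBaseRow (rest : Int) : List Int :=
  (PySem.List.pyRange 1 (rest + 1) 1).foldl (fun row res => row.set res.toNat (-1)) (pvR1 rest)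

def pvLStep (rest c : Int) (R : List Int) : List Int :=
  (PySem.List.pyRange 1 (rest + 1) 1).foldl
    (fun row res => row.set res.toNat (pvVal c R res)) (pvR1 rest)

def pvROWS (rest : Int) (l : List Int) : List Int := l.foldr (pvLStep rest) (pvBaseRow rest)

theorem pv_length_R1 (rest : Int) : (pvR1 rest).length = (rest + 1).toNat := by
  simp [pvR1, PySem.List.length_pyRange_one]

theorem pv_outer_char (arr : List Int) (rest : Int) :
    ∀ (j : Nat) (dp : List (List Int)), j ≤ arr.length → dp.length = arr.length + 1 →
    (∀ i : Nat, i < j → dp.getD i [] = pvR1 rest) →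
    (∀ i : Nat, j ≤ i → i ≤ arr.length → dp.getD i [] = pvROWS rest (arr.drop i)) →
    ((PySem.List.pyRange ((j : Int) - 1) (-1) (-1)).foldl
      (fun dp i =>
        (PySem.List.pyRange 1 (rest + 1) 1).foldl
          (fun dp res =>
            let p1 := (dp.getD (i.toNat + 1) []).getD res.toNat (-2)
            let p2 := if res < arr.getD i.toNat 0 then (-1 : Int)
                      else (dp.getD (i.toNat + 1) []).getD (res - arr.getD i.toNat 0).toNat (-2)
            let v : Int :=
              if p1 = -1 ∧ p2 = -1 then -1
              else if p1 = -1 then p2 + 1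
              else if p2 = -1 then p1
              else min p1 (p2 + 1)
            dp.set i.toNat ((dp.getD i.toNat []).set res.toNat v)) dp) dp).getD 0 []
      = pvROWS rest arr := by
  intro j
  induction j with
  | zero =>
    intro dp _ _ _ hhigh
    rw [PySem.List.pyRange_neg_one_eq_nil (by omega)]
    simpa using hhigh 0 (Nat.le_refl 0) (by omega)
  | succ j ih =>
    intro dp hj hlen hlow hhigh
    have hc1 : ((j + 1 : Nat) : Int) - 1 = (j : Int) := by push_cast; ring
    rw [hc1, PySem.List.pyRange_neg_one_cons (by omega), List.foldl_cons]
    have hjlt : j < arr.length := by omega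
    -- the inner loop writes only row j, reading rows j and j+1
    have hfix := pv_foldl_set_fix (PySem.List.pyRange 1 (rest + 1) 1) j
      (fun A B res => B.set res.toNat (pvVal (arr.getD j 0) A res)) ([] : List Int) dp
      (by omega)
    have hstep :
        (PySem.List.pyRange 1 (rest + 1) 1).foldl
          (fun dp res =>
            let p1 := (dp.getD (((j : Int)).toNat + 1) []).getD res.toNat (-2)
            let p2 := if res < arr.getD ((j : Int)).toNat 0 then (-1 : Int)
                      else (dp.getD (((j : Int)).toNat + 1) []).getD (res - arr.getD ((j : Int)).toNat 0).toNat (-2)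
            let v : Int :=
              if p1 = -1 ∧ p2 = -1 then -1
              else if p1 = -1 then p2 + 1
              else if p2 = -1 then p1
              else min p1 (p2 + 1)
            dp.set ((j : Int)).toNat ((dp.getD ((j : Int)).toNat []).set res.toNat v)) dp
        = dp.set j ((PySem.List.pyRange 1 (rest + 1) 1).foldl
            (fun B res => B.set res.toNat (pvVal (arr.getD j 0) (dp.getD (j + 1) []) res))
            (dp.getD j [])) := by
      simpa [pvVal] using hfix
    rw [hstep]
    have hrowj : dp.getD j [] = pvR1 rest := hlow j (by omega)
    have hrowj1 : dp.getD (j + 1) [] = pvROWS rest (arr.drop (j + 1)) :=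
      hhigh (j + 1) (Nat.le_refl _) (by omega)
    have hdrop : arr.drop j = arr[j] :: arr.drop (j + 1) := List.drop_eq_getElem_cons hjlt
    have hgetj : arr.getD j 0 = arr[j] := by
      simp [List.getD, List.getElem?_eq_getElem hjlt]
    have hnew : (PySem.List.pyRange 1 (rest + 1) 1).foldl
        (fun B res => B.set res.toNat (pvVal (arr.getD j 0) (dp.getD (j + 1) []) res))
        (dp.getD j []) = pvROWS rest (arr.drop j) := by
      rw [hrowj, hrowj1, hgetj]
      simp only [pvROWS, hdrop, List.foldr_cons, pvLStep]
    rw [hnew]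
    refine ih (dp.set j (pvROWS rest (arr.drop j))) (by omega) (by simpa using hlen) ?_ ?_
    · intro i hi
      rw [pv_getD_set_ne _ _ _ _ _ (by omega)]
      exact hlow i (by omega)
    · intro i hi1 hi2
      rcases Nat.eq_or_lt_of_le hi1 with h | h
      · rw [← h, pv_getD_set_self _ _ _ _ (by omega)]
      · rw [pv_getD_set_ne _ _ _ _ _ (by omega)]
        exact hhigh i (by omega) hi2

theorem pv_A_char (arr : List Int) (rest : Int) :
    biaojiegou arr rest = (pvROWS rest arr).getD rest.toNat (-2) := by
  simp only [biaojiegou]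
  have hcast : ((arr.length : Int) + 1) = ((arr.length + 1 : Nat) : Int) := by push_cast; ring
  -- phase 0: the comprehension is a replicate
  have h0 : (PySem.List.pyRange 0 ((arr.length : Int) + 1) 1).map
      (fun _ => (PySem.List.pyRange 0 (rest + 1) 1).map (fun _ => (-2 : Int)))
      = List.replicate (arr.length + 1) ((PySem.List.pyRange 0 (rest + 1) 1).map (fun _ => (-2 : Int))) := by
    rw [List.map_const']
    congr 1
    rw [PySem.List.length_pyRange_one]
    omega
  -- phase 1: dp[i][0] = 0 for every row
  have h1 : (PySem.List.pyRange 0 ((arr.length : Int) + 1) 1).foldl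
      (fun dp i => dp.set i.toNat ((dp.getD i.toNat []).set 0 0))
      (List.replicate (arr.length + 1) ((PySem.List.pyRange 0 (rest + 1) 1).map (fun _ => (-2 : Int))))
      = List.replicate (arr.length + 1) (pvR1 rest) := by
    rw [hcast, PySem.List.pyRange_zero_nat, List.foldl_map]
    simp only [Int.toNat_natCast]
    have := pv_foldl_set_diag (fun row => row.set 0 0) ([] : List Int)
      ((PySem.List.pyRange 0 (rest + 1) 1).map (fun _ => (-2 : Int)))
      (arr.length + 1) (arr.length + 1) (le_refl _)
    simpa [pvR1] using this
  -- phase 2: the last row becomes the base row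
  have h2 : (PySem.List.pyRange 1 (rest + 1) 1).foldl
      (fun dp res => dp.set arr.length ((dp.getD arr.length []).set res.toNat (-1)))
      (List.replicate (arr.length + 1) (pvR1 rest))
      = (List.replicate (arr.length + 1) (pvR1 rest)).set arr.length (pvBaseRow rest) := by
    have hgd : (List.replicate (arr.length + 1) (pvR1 rest)).getD arr.length [] = pvR1 rest := by
      simp [List.getD, List.getElem?_replicate, Nat.lt_succ_self]
    have := pv_foldl_set_fix (PySem.List.pyRange 1 (rest + 1) 1) arr.length
      (fun _ B res => B.set res.toNat (-1)) ([] : List Int)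
      (List.replicate (arr.length + 1) (pvR1 rest)) (by simp)
    simpa [hgd, pvBaseRow] using this
  rw [h0, h1, h2]
  -- phase 3: the main double loop, via pv_outer_char at j = arr.length
  have h3 := pv_outer_char arr rest arr.length
    ((List.replicate (arr.length + 1) (pvR1 rest)).set arr.length (pvBaseRow rest))
    (le_refl _) (by simp)
    (by
      intro i hi
      rw [pv_getD_set_ne _ _ _ _ _ (by omega)]
      simp [List.getD, List.getElem?_replicate, Nat.lt_succ_of_lt hi])
    (by
      intro i hi1 hi2
      have hieq : i = arr.length := le_antisymm hi2 hi1
      subst hieq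
      rw [pv_getD_set_self _ _ _ _ (by simp)]
      simp [pvROWS])
  rw [h3]

-- encoding agreement: A's -1-sentinel combine equals the Option min-merge under pvEnc
theorem pvVal_enc (c : Int) (R : List Int) (res : Int) (x y : Option Int)
    (hx : R.getD res.toNat (-2) = pvEnc x)
    (hy : (if res < c then (-1 : Int) else R.getD (res - c).toNat (-2)) = pvEnc y)
    (hxv : ∀ v, x = some v → 0 ≤ v) (hyv : ∀ v, y = some v → 0 ≤ v) :
    pvVal c R res = pvEnc (pvM x (pvS y)) := by
  unfold pvVal
  rw [hx, hy]
  rcases x with _ | u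
  · rcases y with _ | v
    · simp [pvEnc, pvM, pvS]
    · have hv := hyv v rfl
      simp only [pvEnc, pvM, pvS, Option.getD_none, Option.getD_some, Option.map_some]
      split_ifs <;> omega
  · have hu := hxv u rfl
    rcases y with _ | v
    · simp only [pvEnc, pvM, pvS, Option.getD_none, Option.getD_some, Option.map_none]
      split_ifs <;> omega
    · have hv := hyv v rfl
      simp only [pvEnc, pvM, pvS, Option.getD_none, Option.getD_some, Option.map_some]
      split_ifs <;> omega

theorem pv_A_rel (rest : Int) (hrest : 0 ≤ rest) :
    ∀ (l : List Int), (∀ c ∈ l, 0 ≤ c) →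
      ∀ (k : Nat), k < (rest + 1).toNat →
        (l.foldr (pvLStep rest) (pvBaseRow rest)).getD k (-2)
          = pvEnc ((l.foldr pvT pvBase) (k : Int)) := by
  intro l
  induction l with
  | nil =>
    intro _ k hk
    rw [List.foldr_nil, List.foldr_nil]
    unfold pvBaseRow
    rw [pv_getD_foldl_set _ _ _ _ k
      (fun j hj => by have := PySem.List.mem_pyRange_one.mp hj; omega)
      (by rw [pv_length_R1]; exact hk)]
    by_cases h1 : (k : Int) ∈ PySem.List.pyRange 1 (rest + 1) 1
    · rw [if_pos h1]
      have hm := PySem.List.mem_pyRange_one.mp h1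
      have hne : k ≠ 0 := by omega
      simp [pvBase, hne, pvEnc]
    · rw [if_neg h1]
      have hk0 : k = 0 := by
        by_contra hne
        exact h1 (PySem.List.mem_pyRange_one.mpr (by omega))
      subst hk0
      unfold pvR1
      rw [pv_getD_set_self _ _ _ _ (by rw [List.length_map, PySem.List.length_pyRange_one]; omega)]
      simp [pvBase, pvEnc]
  | cons c t ih =>
    intro hc k hk
    have hc0 : 0 ≤ c := hc c (by simp)
    have hct : ∀ d ∈ t, 0 ≤ d := fun d hd => hc d (by simp [hd])
    rw [List.foldr_cons, List.foldr_cons]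
    unfold pvLStep
    rw [pv_getD_foldl_set _ _ _ _ k
      (fun j hj => by have := PySem.List.mem_pyRange_one.mp hj; omega)
      (by rw [pv_length_R1]; exact hk)]
    by_cases h1 : (k : Int) ∈ PySem.List.pyRange 1 (rest + 1) 1
    · rw [if_pos h1]
      have hm := PySem.List.mem_pyRange_one.mp h1
      have hx : (t.foldr (pvLStep rest) (pvBaseRow rest)).getD ((k : Int)).toNat (-2)
          = pvEnc ((t.foldr pvT pvBase) (k : Int)) := by
        rw [Int.toNat_natCast]; exact ih hct k hk
      have hy : (if (k : Int) < c then (-1 : Int)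
          else (t.foldr (pvLStep rest) (pvBaseRow rest)).getD ((k : Int) - c).toNat (-2))
          = pvEnc ((t.foldr pvT pvBase) ((k : Int) - c)) := by
        by_cases hkc : (k : Int) < c
        · rw [if_pos hkc, foldr_pvT_neg hct _ (by omega)]
          rfl
        · rw [if_neg hkc]
          have hk2 : ((k : Int) - c).toNat < (rest + 1).toNat := by omega
          have hcast : ((((k : Int) - c).toNat : Nat) : Int) = (k : Int) - c := by omega
          rw [ih hct (((k : Int) - c).toNat) hk2, hcast]
      exact pvVal_enc c _ (k : Int) _ _ hx hy
        (fun v hv => foldr_pvT_nonneg _ v hv) (fun v hv => foldr_pvT_nonneg _ v hv)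
    · rw [if_neg h1]
      have hk0 : k = 0 := by
        by_contra hne
        exact h1 (PySem.List.mem_pyRange_one.mpr (by omega))
      subst hk0
      unfold pvR1
      rw [pv_getD_set_self _ _ _ _ (by rw [List.length_map, PySem.List.length_pyRange_one]; omega)]
      have h0 : pvT c (t.foldr pvT pvBase) 0 = some 0 :=
        pvT_zero hc0 (foldr_pvT_neg hct) (foldr_pvT_zero hct)
      rw [show ((0 : Nat) : Int) = (0 : Int) from rfl, h0]
      rfl

-- B-side ---------------------------------------------------------------------
-- pvSh names the masked shift the inner loop ORs in; pvMix is the shape of one coin's update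
-- (each layer ORed with the shifted previous layer, a fresh top layer at the end).
theorem pvM_none_right (x : Option Int) : pvM x none = x := by cases x <;> rfl

def pvSh (c full b : Int) : Int := pvLand (pvShl b c) full

def pvMix (c full : Int) : List Int → Int → List Int
  | [], prev => [pvSh c full prev]
  | b :: bs, prev => pvLor b (pvSh c full prev) :: pvMix c full bs b

-- the first layer whose bit s is set (none if no layer has it)
def pvMinL : List Int → Nat → Option Int
  | [], _ => none
  | b :: bs, s => if b.toNat.testBit s then some 0 else (pvMinL bs s).map (· + 1)

def pvMinSh (c full : Int) : List Int → Nat → Option Int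
  | [], _ => none
  | b :: bs, s =>
    if (pvSh c full b).toNat.testBit s then some 0 else (pvMinSh c full bs s).map (· + 1)

theorem pvMinL_nonneg (l : List Int) (s : Nat) :
    ∀ v, pvMinL l s = some v → 0 ≤ v := by
  induction l with
  | nil => intro v h; exact absurd h (by simp [pvMinL])
  | cons b bs ih =>
    intro v h
    by_cases hb : b.toNat.testBit s
    · simp [pvMinL, hb] at h; omega
    · cases hx : pvMinL bs s with
      | none => simp [pvMinL, hb, hx] at h
      | some w =>
        simp [pvMinL, hb, hx] at h
        have := ih w hx
        omega

theorem pvMinSh_nonneg (c full : Int) (l : List Int) (s : Nat) :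
    ∀ v, pvMinSh c full l s = some v → 0 ≤ v := by
  induction l with
  | nil => intro v h; exact absurd h (by simp [pvMinSh])
  | cons b bs ih =>
    intro v h
    by_cases hb : (pvSh c full b).toNat.testBit s
    · simp [pvMinSh, hb] at h; omega
    · cases hx : pvMinSh c full bs s with
      | none => simp [pvMinSh, hb, hx] at h
      | some w =>
        simp [pvMinSh, hb, hx] at h
        have := ih w hx
        omega

theorem pvM_some_zero_left (y : Option Int) (hy : ∀ v, y = some v → 0 ≤ v) :
    pvM (some 0) y = some 0 := by
  cases hv : y with
  | none => rfl
  | some v => have := hy v hv; simp [pvM]; omega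

theorem pvM_some_zero_right (x : Option Int) (hx : ∀ v, x = some v → 0 ≤ v) :
    pvM x (some 0) = some 0 := by
  cases hv : x with
  | none => rfl
  | some v => have := hx v hv; simp [pvM]; omega

theorem pvM_map_add_one (x y : Option Int) :
    pvM (x.map (· + 1)) (y.map (· + 1)) = (pvM x y).map (· + 1) := by
  cases x <;> cases y <;> simp [pvM] <;> omega

theorem map_nonneg_succ {z : Option Int} (hz : ∀ v, z = some v → 0 ≤ v) :
    ∀ v, z.map (· + 1) = some v → 0 ≤ v := by
  intro v h
  rw [Option.map_eq_some_iff] at h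
  obtain ⟨w, hw, rfl⟩ := h
  have := hz w hw
  omega

theorem pvMinL_cons (b : Int) (bs : List Int) (s : Nat) :
    pvMinL (b :: bs) s = if b.toNat.testBit s then some 0 else (pvMinL bs s).map (· + 1) := rfl

theorem pvMinSh_cons (c full b : Int) (bs : List Int) (s : Nat) :
    pvMinSh c full (b :: bs) s
      = if (pvSh c full b).toNat.testBit s then some 0 else (pvMinSh c full bs s).map (· + 1) := rfl

-- the min layer of one coin's update splits into the old min and the shifted min
theorem pvMinL_mix (c full : Int) (s : Nat) :
    ∀ (bs : List Int) (prev : Int),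
      pvMinL (pvMix c full bs prev) s = pvM (pvMinL bs s) (pvMinSh c full (prev :: bs) s) := by
  intro bs
  induction bs with
  | nil =>
    intro prev
    by_cases h : (pvSh c full prev).toNat.testBit s <;>
      simp [pvMix, pvMinL, pvMinSh, pvM, h]
  | cons b bs ih =>
    intro prev
    have hlor : (pvLor b (pvSh c full prev)).toNat.testBit s
        = (b.toNat.testBit s || (pvSh c full prev).toNat.testBit s) := by
      simp [pvLor, Nat.testBit_lor]
    show pvMinL (pvLor b (pvSh c full prev) :: pvMix c full bs b) s
        = pvM (pvMinL (b :: bs) s) (pvMinSh c full (prev :: b :: bs) s)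
    rw [pvMinL_cons, pvMinL_cons, pvMinSh_cons, hlor]
    by_cases hb : b.toNat.testBit s <;> by_cases hp : (pvSh c full prev).toNat.testBit s
    · rw [if_pos (by simp [hb, hp]), if_pos hb, if_pos hp]
      simp [pvM]
    · rw [if_pos (by simp [hb, hp]), if_pos hb, if_neg (by simp [hp])]
      exact (pvM_some_zero_left _ (map_nonneg_succ (pvMinSh_nonneg c full (b :: bs) s))).symm
    · rw [if_pos (by simp [hb, hp]), if_neg (by simp [hb]), if_pos hp]
      exact (pvM_some_zero_right _ (map_nonneg_succ (pvMinL_nonneg bs s))).symm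
    · rw [if_neg (by simp [hb, hp]), if_neg (by simp [hb]), if_neg (by simp [hp]), ih b]
      exact (pvM_map_add_one _ _).symm

theorem pvMinL_step (c full b0 : Int) (bs : List Int) (s : Nat) :
    pvMinL (b0 :: pvMix c full bs b0) s
      = pvM (pvMinL (b0 :: bs) s) ((pvMinSh c full (b0 :: bs) s).map (· + 1)) := by
  rw [pvMinL_cons b0 (pvMix c full bs b0) s, pvMinL_cons b0 bs s]
  by_cases hb : b0.toNat.testBit s
  · rw [if_pos hb, if_pos hb]
    exact (pvM_some_zero_left _ (map_nonneg_succ (pvMinSh_nonneg c full (b0 :: bs) s))).symm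
  · rw [if_neg hb, if_neg hb, pvMinL_mix c full s bs b0]
    exact (pvM_map_add_one _ _).symm

-- the shifted min is the old min at s - c (window s ≤ rest, coin 0 ≤ c)
theorem pvMinSh_eq (c full rest : Int) (hc : 0 ≤ c)
    (hfull : full.toNat = 2 ^ (rest + 1).toNat - 1) (s : Nat) (hs : (s : Int) ≤ rest) :
    ∀ l : List Int,
      pvMinSh c full l s = if c.toNat ≤ s then pvMinL l (s - c.toNat) else none := by
  have hbit : ∀ b : Int, (pvSh c full b).toNat.testBit s
      = (decide (c.toNat ≤ s) && b.toNat.testBit (s - c.toNat)) := by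
    intro b
    have hlt : s < (rest + 1).toNat := by omega
    simp only [pvSh, pvLand, pvShl, Int.toNat_natCast]
    rw [Nat.testBit_land, Nat.testBit_shiftLeft, hfull, Nat.testBit_two_pow_sub_one]
    simp [hlt, ge_iff_le, Bool.and_comm]
  intro l
  induction l with
  | nil => by_cases h : c.toNat ≤ s <;> simp [pvMinSh, pvMinL, h]
  | cons b bs ih =>
    by_cases h : c.toNat ≤ s
    · rw [if_pos h] at ih ⊢
      simp [pvMinSh, pvMinL, hbit b, h, ih]
    · rw [if_neg h] at ih ⊢
      simp [pvMinSh, hbit b, h, ih]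

-- the descending inner loop writes each index k+1 once, reading only untouched indices
theorem pv_dfold (g : Int → Int → Int) :
    ∀ (j : Nat) (bs : List Int), j + 1 ≤ bs.length → ∀ i : Nat,
      ((PySem.List.pyRange ((j : Int) - 1) (-1) (-1)).foldl
        (fun bs k => bs.set (k.toNat + 1) (g (bs.getD k.toNat 0) (bs.getD (k.toNat + 1) 0))) bs).getD i 0
        = if 1 ≤ i ∧ i ≤ j then g (bs.getD (i - 1) 0) (bs.getD i 0) else bs.getD i 0 := by
  intro j
  induction j with
  | zero =>
    intro bs _ i
    rw [PySem.List.pyRange_neg_one_eq_nil (by omega)]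
    rw [if_neg (by omega)]
    rfl
  | succ j ih =>
    intro bs hlen i
    have hc1 : ((j + 1 : Nat) : Int) - 1 = (j : Int) := by push_cast; ring
    rw [hc1, PySem.List.pyRange_neg_one_cons (by omega), List.foldl_cons]
    have hset : ((j : Int)).toNat = j := by omega
    set v := g (bs.getD j 0) (bs.getD (j + 1) 0) with hv
    have hstep : bs.set (((j : Int)).toNat + 1) (g (bs.getD ((j : Int)).toNat 0) (bs.getD (((j : Int)).toNat + 1) 0))
        = bs.set (j + 1) v := by rw [hset]
    rw [hstep, ih (bs.set (j + 1) v) (by simp only [List.length_set]; omega) i]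
    by_cases h1 : 1 ≤ i ∧ i ≤ j
    · rw [if_pos h1, if_pos (by omega)]
      rw [pv_getD_set_ne _ _ _ _ _ (by omega), pv_getD_set_ne _ _ _ _ _ (by omega)]
    · rw [if_neg h1]
      by_cases h2 : i = j + 1
      · rw [h2, pv_getD_set_self _ _ _ _ (by omega), if_pos (by omega)]
        simp [hv]
      · rw [pv_getD_set_ne _ _ _ _ _ (by omega), if_neg (by omega)]

theorem pv_dfold_len (g : Int → Int → Int) (R : List Int) :
    ∀ bs : List Int,
      (R.foldl (fun bs k => bs.set (k.toNat + 1) (g (bs.getD k.toNat 0) (bs.getD (k.toNat + 1) 0))) bs).length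
        = bs.length := by
  induction R with
  | nil => intro bs; rfl
  | cons k ks ih => intro bs; rw [List.foldl_cons, ih]; simp

theorem pvMix_length (c full : Int) :
    ∀ (bs : List Int) (prev : Int), (pvMix c full bs prev).length = bs.length + 1 := by
  intro bs
  induction bs with
  | nil => intro prev; rfl
  | cons b bs ih => intro prev; simp [pvMix, ih]

theorem pvLor_zero_left (c full b : Int) : pvLor 0 (pvSh c full b) = pvSh c full b := by
  simp [pvLor, pvSh, pvLand]

theorem pvMix_getD (c full : Int) :
    ∀ (bs : List Int) (prev : Int) (i : Nat), i ≤ bs.length →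
      (pvMix c full bs prev).getD i 0
        = pvLor ((bs ++ [0]).getD i 0) (pvSh c full ((prev :: bs).getD i 0)) := by
  intro bs
  induction bs with
  | nil =>
    intro prev i hi
    have : i = 0 := by simpa using hi
    subst this
    show pvSh c full prev = pvLor 0 (pvSh c full prev)
    rw [pvLor_zero_left]
  | cons b bs ih =>
    intro prev i hi
    cases i with
    | zero => rfl
    | succ i => exact ih b i (by simpa using hi)

-- the inner loop's result is exactly the pvMix shape
theorem pv_step_shape (c full b0 : Int) (bs : List Int) :
    ((PySem.List.pyRange ((((b0 :: bs) ++ [0]).length : Int) - 2) (-1) (-1)).foldl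
      (fun bs k =>
        bs.set (k.toNat + 1)
          (pvLor (bs.getD (k.toNat + 1) 0) (pvLand (pvShl (bs.getD k.toNat 0) c) full)))
      ((b0 :: bs) ++ [0]))
      = b0 :: pvMix c full bs b0 := by
  have hg : (fun (bs : List Int) (k : Int) =>
      bs.set (k.toNat + 1)
        (pvLor (bs.getD (k.toNat + 1) 0) (pvLand (pvShl (bs.getD k.toNat 0) c) full)))
      = (fun (bs : List Int) (k : Int) =>
      bs.set (k.toNat + 1)
        ((fun p q => pvLor q (pvSh c full p)) (bs.getD k.toNat 0) (bs.getD (k.toNat + 1) 0))) := rfl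
  set j : Nat := bs.length + 1 with hj
  have hlen2 : ((b0 :: bs) ++ [0]).length = bs.length + 2 := by simp
  have hstart : ((((b0 :: bs) ++ [0]).length : Int)) - 2 = (j : Int) - 1 := by
    rw [hlen2, hj]; push_cast; ring
  rw [hg, hstart]
  have hpt := pv_dfold (fun p q => pvLor q (pvSh c full p)) j ((b0 :: bs) ++ [0])
    (by rw [hlen2, hj])
  have hlenf := pv_dfold_len (fun p q => pvLor q (pvSh c full p))
    (PySem.List.pyRange ((j : Int) - 1) (-1) (-1)) ((b0 :: bs) ++ [0])
  apply List.ext_getElem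
  · rw [hlenf, hlen2]
    simp [pvMix_length]
  · intro i hi1 hi2
    have hi : i < bs.length + 2 := by
      rw [hlenf, hlen2] at hi1; exact hi1
    have hL : ∀ (l : List Int) (h : i < l.length), l[i] = l.getD i 0 := by
      intro l h
      simp [List.getD, List.getElem?_eq_getElem h]
    rw [hL _ hi1, hL _ hi2, hpt i]
    by_cases h1 : 1 ≤ i ∧ i ≤ j
    · rw [if_pos h1]
      have hgd1 : (b0 :: pvMix c full bs b0).getD i 0 = (pvMix c full bs b0).getD (i - 1) 0 := by
        cases i with
        | zero => omega
        | succ i => simp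
      rw [hgd1, pvMix_getD c full bs b0 (i - 1) (by omega)]
      have e1 : ((b0 :: bs) ++ [0]).getD i 0 = (bs ++ [0]).getD (i - 1) 0 := by
        cases i with
        | zero => omega
        | succ i => simp
      have e2 : ((b0 :: bs) ++ [0]).getD (i - 1) 0 = (b0 :: bs).getD (i - 1) 0 := by
        have : i - 1 < (b0 :: bs).length := by simp; omega
        rw [List.getD_append _ _ _ _ this]
      rw [e1, e2]
    · rw [if_neg h1]
      have hi0 : i = 0 := by omega
      subst hi0
      rfl

-- scanning the layers returns the first layer containing bit rest
theorem pvScan_cons (b : Int) (bs : List Int) (rest k : Int) :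
    pvScan (b :: bs) rest k
      = if pvLand (pvShr b rest) 1 ≠ 0 then k else pvScan bs rest (k + 1) := rfl

theorem pv_scan (rest : Int) (hrest : 0 ≤ rest) :
    ∀ (l : List Int) (k : Int),
      pvScan l rest k = match pvMinL l rest.toNat with
        | none => -1
        | some v => v + k := by
  intro l
  induction l with
  | nil => intro k; rfl
  | cons b bs ih =>
    intro k
    have h1 : pvLand (pvShr b rest) 1 = (((b.toNat >>> rest.toNat) &&& 1 : Nat) : Int) := by
      simp only [pvLand, pvShr, Int.toNat_natCast, Int.toNat_one]
    have hcond : (pvLand (pvShr b rest) 1 ≠ 0) ↔ b.toNat.testBit rest.toNat := by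
      rw [h1, Nat.testBit, Nat.and_comm]
      generalize b.toNat >>> rest.toNat = n
      simp [bne_iff_ne]
      omega
    by_cases hb : b.toNat.testBit rest.toNat
    · rw [pvScan_cons, if_pos (hcond.mpr hb), pvMinL_cons, if_pos hb]
      show k = 0 + k
      omega
    · rw [pvScan_cons, if_neg (fun hx => hb (hcond.mp hx)), ih (k + 1), pvMinL_cons, if_neg hb]
      cases pvMinL bs rest.toNat with
      | none => rfl
      | some v =>
        simp only [Option.map_some]
        show v + (k + 1) = v + 1 + k
        omega

-- the outer fold maintains: layer minima = the min-count model on the window [0, rest]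
theorem pv_B_fold2 (rest full : Int) (hrest : 0 ≤ rest)
    (hfull : full.toNat = 2 ^ (rest + 1).toNat - 1) :
    ∀ (l : List Int), (∀ c ∈ l, 0 ≤ c) →
    ∀ (bits : List Int) (m : Int → Option Int), bits ≠ [] →
    (∀ s : Nat, (s : Int) ≤ rest → pvMinL bits s = m (s : Int)) →
    (∀ s : Int, s < 0 → m s = none) →
    (∀ s : Nat, (s : Int) ≤ rest →
      pvMinL (l.foldl (fun bits c =>
        if c ≤ rest then
          ((PySem.List.pyRange (((bits ++ [0]).length : Int) - 2) (-1) (-1)).foldl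
            (fun bs k =>
              bs.set (k.toNat + 1)
                (pvLor (bs.getD (k.toNat + 1) 0) (pvLand (pvShl (bs.getD k.toNat 0) c) full)))
            (bits ++ [0]))
        else bits) bits) s
        = (l.foldl (fun r c => pvT c r) m) (s : Int)) := by
  intro l
  induction l with
  | nil => intro _ bits m _ hinv _ s hs; exact hinv s hs
  | cons c t ih =>
    intro hc bits m hne hinv hneg s hs
    have hc0 : 0 ≤ c := hc c (by simp)
    have hct : ∀ d ∈ t, 0 ≤ d := fun d hd => hc d (by simp [hd])
    simp only [List.foldl_cons]
    by_cases hcr : c ≤ rest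
    · obtain ⟨b0, bs, rfl⟩ := List.exists_cons_of_ne_nil hne
      rw [if_pos hcr]
      rw [pv_step_shape c full b0 bs]
      refine ih hct _ (pvT c m) (by simp) ?_ (pvT_neg hc0 hneg) s hs
      intro s2 hs2
      rw [pvMinL_step c full b0 bs s2, hinv s2 hs2,
        pvMinSh_eq c full rest hc0 hfull s2 hs2 (b0 :: bs)]
      show pvM (m (s2 : Int)) _ = pvM (m (s2 : Int)) ((m ((s2 : Int) - c)).map (· + 1))
      congr 1
      by_cases hcs : c.toNat ≤ s2
      · rw [if_pos hcs, hinv (s2 - c.toNat) (by omega)]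
        have : (((s2 - c.toNat : Nat)) : Int) = (s2 : Int) - c := by omega
        rw [this]
      · rw [if_neg hcs, hneg ((s2 : Int) - c) (by omega)]
    · rw [if_neg hcr]
      refine ih hct bits (pvT c m) hne ?_ (pvT_neg hc0 hneg) s hs
      intro s2 hs2
      rw [hinv s2 hs2]
      show m (s2 : Int) = pvM (m (s2 : Int)) ((m ((s2 : Int) - c)).map (· + 1))
      rw [hneg ((s2 : Int) - c) (by omega)]
      exact (pvM_none_right _).symm

theorem pv_B_char (arr : List Int) (rest : Int) (hrest : 0 ≤ rest) (hc : ∀ c ∈ arr, 0 ≤ c) :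
    biaojiegou_alt arr rest = pvEnc ((arr.foldl (fun r c => pvT c r) pvBase) rest) := by
  show pvScan (arr.foldl _ [1]) rest 0 = _
  have hfull : (pvShl 1 (rest + 1) - 1).toNat = 2 ^ (rest + 1).toNat - 1 := by
    have h1 : (1 : Int).toNat <<< (rest + 1).toNat = 2 ^ (rest + 1).toNat := by
      rw [Nat.shiftLeft_eq]; simp
    have h2 : 1 ≤ 2 ^ (rest + 1).toNat := Nat.one_le_two_pow
    simp only [pvShl, h1]
    omega
  have hbase : ∀ s : Nat, (s : Int) ≤ rest → pvMinL [1] s = pvBase (s : Int) := by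
    intro s _
    by_cases h0 : s = 0
    · subst h0
      simp [pvMinL, pvBase, Nat.testBit_one_eq_true_iff_self_eq_zero]
    · have ht : (1 : Int).toNat.testBit s = false := by
        show Nat.testBit 1 s = false
        rw [Bool.eq_false_iff]
        intro h
        exact h0 (Nat.testBit_one_eq_true_iff_self_eq_zero.mp h)
      rw [pvMinL_cons, if_neg (by simp only [ht]; simp)]
      simp [pvMinL, pvBase, h0]
  have hneg : ∀ s : Int, s < 0 → pvBase s = none := by
    intro s h
    simp only [pvBase, if_neg (by omega : ¬ s = 0)]
  have hmain := pv_B_fold2 rest (pvShl 1 (rest + 1) - 1) hrest hfull arr hc [1] pvBase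
    (by simp) hbase hneg rest.toNat (by omega)
  rw [pv_scan rest hrest _ 0, hmain]
  have hcast : ((rest.toNat : Nat) : Int) = rest := by omega
  rw [hcast]
  cases (arr.foldl (fun r c => pvT c r) pvBase) rest with
  | none => rfl
  | some v => simp [pvEnc]

-- ===== VERDICT (by name: the statement is the Claim_ definition above) =====
theorem biaojiegou_spec : Claim_equal_biaojiegou := by
  intro arr rest _ hpre
  obtain ⟨hrest, hc⟩ := hpre
  show biaojiegou arr rest = biaojiegou_alt arr rest
  rw [pv_A_char arr rest, pv_B_char arr rest hrest hc]
  rw [show pvROWS rest arr = arr.foldr (pvLStep rest) (pvBaseRow rest) from rfl]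
  rw [pv_A_rel rest hrest arr hc rest.toNat (by omega)]
  have hcast : ((rest.toNat : Nat) : Int) = rest := by omega
  rw [hcast, foldl_pvT_eq_foldr]
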